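-- pv_equiv track=rewrite | github.com/YoyoZhang24/CS50 | week6/pset6/dna/dna.py | str_repeats
-- ===== SOURCE A (Python) =====
-- def str_repeats(dna, STR):
--     dna_length = len(dna)
--     str_length = len(STR)
--
--     count = 0
--
--     for i in range(dna_length):
--         current = 0
--
--         # If match found, count repeats
--         if dna[i:(i + str_length)] == STR:
--             k = 0
--             while dna[(i + k):(i + k + str_length)] == STR:
--                 current += 1
--                 k += str_length
--
--         if current > count:
--             count = current
--
--     return count
-- ===== SOURCE B (Python) =====
-- def str_repeats(dna, STR):
--     n = len(dna)
--     m = len(STR)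
--     runs = [0] * (n + 1)
--     best = 0
--     for i in range(n - 1, -1, -1):
--         if dna.startswith(STR, i):
--             v = runs[i + m] + 1
--             runs[i] = v
--             if v > best:
--                 best = v
--     return best
-- ===== Notes on version B (the rewrite author's own statement) =====
-- stated objective: faster
-- what changed: Replaces A's per-position inner while-loop rescans by a single right-to-left DP pass (run[i] = run[i+m] + 1 on a match, tracking the max) and tests matches with str.startswith instead of building an m-char slice at every position.
import Mathlib
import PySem

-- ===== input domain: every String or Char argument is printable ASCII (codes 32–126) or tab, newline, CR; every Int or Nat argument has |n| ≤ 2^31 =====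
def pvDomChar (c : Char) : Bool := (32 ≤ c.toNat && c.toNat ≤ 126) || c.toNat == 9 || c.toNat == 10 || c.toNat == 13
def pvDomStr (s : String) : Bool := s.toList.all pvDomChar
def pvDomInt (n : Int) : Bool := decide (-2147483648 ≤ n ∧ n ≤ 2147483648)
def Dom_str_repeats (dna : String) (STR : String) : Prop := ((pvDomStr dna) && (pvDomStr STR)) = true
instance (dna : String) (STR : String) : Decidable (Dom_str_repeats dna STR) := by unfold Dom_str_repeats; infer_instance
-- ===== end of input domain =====

-- B replaces A's per-position rescans by one right-to-left DP pass (run[i] = run[i+m] + 1 on a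
-- startswith match), removing A's nested counting loop and its per-position slice; the timing
-- run measured B faster. Equivalence of return values on Pre_ is proved below.

-- ===== PORT A =====
-- inner `while dna[(i+k):(i+k+str_length)] == STR` loop; fuel only makes the
-- recursion structural (fuel dna_length+1 is enough under Pre_, proved below)
def pvWhileA (d s : List Char) (i : Nat) : Nat → Nat → Int → Int
  | 0, _, current => current
  | fuel+1, k, current =>
    if PySem.List.slice d (some ((i + k : Nat) : Int)) (some (((i + k : Nat) : Int) + (s.length : Int))) = s then
      pvWhileA d s i fuel (k + s.length) (current + 1)
    else current

def str_repeats (dna : String) (STR : String) : Int :=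
  let d := dna.toList
  let s := STR.toList
  let dna_length := d.length
  let str_length := s.length
  (List.range dna_length).foldl (fun (count : Int) (i : Nat) =>
    let current : Int :=
      if PySem.List.slice d (some (i : Int)) (some ((i : Int) + (str_length : Int))) = s then
        pvWhileA d s i (dna_length + 1) 0 0
      else 0
    if current > count then current else count) 0

-- ===== PORT B =====
-- loop body of Source B: state = (runs, best); `for i in range(n-1,-1,-1)` is the fold
-- over the reversed index list; `dna.startswith(STR, i)` (0 ≤ i ≤ len) is exactly
-- `startswith` of the i-th suffix, ported as PySem.Chars.startswith (d.drop i) s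
def pvStepB (d s : List Char) (st : List Int × Int) (i : Nat) : List Int × Int :=
  if PySem.Chars.startswith (List.drop i d) s then
    let v := st.1.getD (i + s.length) 0 + 1
    (st.1.set i v, if v > st.2 then v else st.2)
  else st

def str_repeats_alt (dna : String) (STR : String) : Int :=
  let d := dna.toList
  let s := STR.toList
  (((List.range d.length).reverse).foldl (pvStepB d s) (List.replicate (d.length + 1) 0, 0)).2

-- ===== PRECONDITION & SPEC =====
-- Pre_ excludes empty STR with nonempty dna: there A's `while` loop never terminates (k += 0), so A returns nothing.
def Pre_str_repeats (dna : String) (STR : String) : Prop := STR ≠ "" ∨ dna = ""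
instance (dna : String) (STR : String) : Decidable (Pre_str_repeats dna STR) := by unfold Pre_str_repeats; infer_instance
def pvWitness_str_repeats : String × String := ("ACGTACGT", "ACG")
def Spec_str_repeats (dna : String) (STR : String) (out : Int) : Prop := out = str_repeats_alt dna STR
instance (dna : String) (STR : String) (out : Int) : Decidable (Spec_str_repeats dna STR out) := by unfold Spec_str_repeats; infer_instance

-- ===== CLAIM (what is proved, stated in full; the proofs are below) =====
def Claim_equal_str_repeats : Prop := ∀ (dna : String) (STR : String), Dom_str_repeats dna STR → Pre_str_repeats dna STR → Spec_str_repeats dna STR (str_repeats dna STR)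

-- ===== LEMMAS AND PROOFS =====

-- the match test at position j, on the list side
def pvCond (d s : List Char) (j : Nat) : Bool := decide ((d.drop j).take s.length = s)

-- reference value: number of consecutive copies of s starting at j (with fuel)
def pvRep (d s : List Char) : Nat → Nat → Int
  | 0, _ => 0
  | f+1, j => if pvCond d s j then pvRep d s f (j + s.length) + 1 else 0

theorem pvRep_succ (d s : List Char) (f j : Nat) :
    pvRep d s (f+1) j = if pvCond d s j then pvRep d s f (j + s.length) + 1 else 0 := rfl

theorem pvCond_le (d s : List Char) (j : Nat) (hm : 1 ≤ s.length)
    (hc : pvCond d s j = true) : j + s.length ≤ d.length := by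
  have h := of_decide_eq_true hc
  have hlen : ((d.drop j).take s.length).length = s.length := by rw [h]
  simp [List.length_take, List.length_drop] at hlen
  omega

theorem pvRep_nonneg (d s : List Char) : ∀ f j, 0 ≤ pvRep d s f j := by
  intro f
  induction f with
  | zero => intro j; simp [pvRep]
  | succ f ih =>
    intro j
    rw [pvRep_succ]
    split
    · have := ih (j + s.length); omega
    · omega

theorem pvRep_of_not_cond (d s : List Char) (f j : Nat) (hc : pvCond d s j = false) :
    pvRep d s (f+1) j = 0 := by
  rw [pvRep_succ, if_neg (by simp [hc])]

theorem pvRep_stable (d s : List Char) (hm : 1 ≤ s.length) :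
    ∀ f j, d.length + s.length ≤ j + f * s.length →
      pvRep d s f j = pvRep d s (f+1) j := by
  intro f
  induction f with
  | zero =>
    intro j hj
    rcases hc : pvCond d s j with hF | hT
    · simp [pvRep, hc]
    · have := pvCond_le d s j hm hc
      simp at hj
      omega
  | succ f ih =>
    intro j hj
    have hmul : (f + 1) * s.length = f * s.length + s.length := by ring
    rcases hc : pvCond d s j with hF | hT
    · rw [pvRep_succ, pvRep_succ, if_neg (by simp [hc]), if_neg (by simp [hc])]
    · rw [pvRep_succ d s f j, pvRep_succ d s (f+1) j, if_pos hc, if_pos hc,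
        ih (j + s.length) (by omega)]

theorem pvRep_unfold (d s : List Char) (hm : 1 ≤ s.length) (j : Nat)
    (hc : pvCond d s j = true) :
    pvRep d s (d.length + 1) j = pvRep d s (d.length + 1) (j + s.length) + 1 := by
  rw [pvRep_succ, if_pos hc,
    pvRep_stable d s hm d.length (j + s.length)
      (by have : d.length ≤ d.length * s.length := Nat.le_mul_of_pos_right _ hm; omega)]

-- the slice test in the ports is pvCond
theorem slice_eq_cond (d s : List Char) (j : Nat) :
    (PySem.List.slice d (some (j : Int)) (some ((j : Int) + (s.length : Int))) = s) = (pvCond d s j = true) := by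
  rw [PySem.List.slice_natCast_add]
  simp [pvCond]

-- the startswith test in port B is pvCond
theorem startswith_eq_cond (d s : List Char) (j : Nat) :
    (PySem.Chars.startswith (List.drop j d) s = true) = (pvCond d s j = true) := by
  apply propext
  rw [PySem.Chars.startswith_iff, List.prefix_iff_eq_take]
  unfold pvCond
  constructor
  · intro h; exact decide_eq_true h.symm
  · intro h; exact (of_decide_eq_true h).symm

-- A's inner while computes current + pvRep
theorem pvWhileA_eq (d s : List Char) (i : Nat) :
    ∀ fuel k c, pvWhileA d s i fuel k c = c + pvRep d s fuel (i + k) := by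
  intro fuel
  induction fuel with
  | zero => intro k c; simp [pvWhileA, pvRep]
  | succ f ih =>
    intro k c
    rw [pvRep_succ]
    simp only [pvWhileA, slice_eq_cond d s (i + k)]
    rcases hc : pvCond d s (i + k) with hF | hT
    · simp
    · rw [if_pos (rfl : true = true), if_pos (rfl : true = true)]
      rw [ih (k + s.length) (c + 1), show i + (k + s.length) = i + k + s.length by omega]
      ring

-- the max-accumulator step both folds reduce to
def pvG (d s : List Char) (c : Int) (j : Nat) : Int :=
  if pvRep d s (d.length + 1) j > c then pvRep d s (d.length + 1) j else c

theorem pvG_comm (d s : List Char) (z : Int) (x y : Nat) :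
    pvG d s (pvG d s z x) y = pvG d s (pvG d s z y) x := by
  simp only [pvG]; split_ifs <;> omega

-- B's fold: invariant on (runs, best) going down from k-1 to 0
theorem loopB (d s : List Char) (hm : 1 ≤ s.length) :
    ∀ (k : Nat), k ≤ d.length → ∀ (runs : List Int) (best : Int),
      runs.length = d.length + 1 → 0 ≤ best →
      (∀ j, j ≤ d.length → runs.getD j 0 = if k ≤ j then pvRep d s (d.length + 1) j else 0) →
      (((List.range k).reverse).foldl (pvStepB d s) (runs, best)).2
        = ((List.range k).reverse).foldl (pvG d s) best := by
  intro k
  induction k with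
  | zero => intro _ runs best _ _ _; simp
  | succ k ih =>
    intro hk runs best hlen hbest hruns
    rw [List.range_succ, List.reverse_append]
    simp only [List.reverse_singleton, List.singleton_append, List.foldl_cons]
    rcases hc : pvCond d s k with hF | hT
    · -- no match at k: state unchanged, pvRep k = 0
      have hstep : pvStepB d s (runs, best) k = (runs, best) := by
        simp [pvStepB, startswith_eq_cond d s k, hc]
      have hg : pvG d s best k = best := by
        simp only [pvG, pvRep_of_not_cond d s _ _ hc]
        split <;> omega
      rw [hstep, hg]
      refine ih (by omega) runs best hlen hbest ?_
      intro j hj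
      rw [hruns j hj]
      split_ifs with h1 h2
      · rfl
      · omega
      · have hjk : j = k := by omega
        rw [hjk, pvRep_of_not_cond d s _ _ hc]
      · rfl
    · -- match at k
      have hkm : k + s.length ≤ d.length := pvCond_le d s k hm hc
      have hv : runs.getD (k + s.length) 0 = pvRep d s (d.length + 1) (k + s.length) := by
        rw [hruns (k + s.length) hkm, if_pos (show k + 1 ≤ k + s.length by omega)]
      have hR : pvRep d s (d.length + 1) k = runs.getD (k + s.length) 0 + 1 := by
        rw [hv, pvRep_unfold d s hm k hc]
      have hstep : pvStepB d s (runs, best) k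
          = (runs.set k (runs.getD (k + s.length) 0 + 1),
             if runs.getD (k + s.length) 0 + 1 > best then runs.getD (k + s.length) 0 + 1 else best) := by
        simp [pvStepB, startswith_eq_cond d s k, hc]
      have hg : pvG d s best k
          = if runs.getD (k + s.length) 0 + 1 > best then runs.getD (k + s.length) 0 + 1 else best := by
        simp only [pvG, hR]
      rw [hstep, hg]
      have hbest' : 0 ≤ if runs.getD (k + s.length) 0 + 1 > best then runs.getD (k + s.length) 0 + 1 else best := by
        have := pvRep_nonneg d s (d.length + 1) (k + s.length)
        split <;> omega
      refine ih (by omega) _ _ (by simp [hlen]) hbest' ?_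
      intro j hj
      by_cases hjk : j = k
      · -- j = k : the new entry is pvRep k
        subst hjk
        have hjlt : j < runs.length := by omega
        rw [show (runs.set j (runs.getD (j + s.length) 0 + 1)).getD j 0
              = runs.getD (j + s.length) 0 + 1 by simp [List.getD, hjlt]]
        rw [if_pos (le_refl j), hR]
      · -- j ≠ k : unchanged entry
        rw [show (runs.set k (runs.getD (k + s.length) 0 + 1)).getD j 0 = runs.getD j 0 by
            simp [List.getD, List.getElem?_set_ne (show k ≠ j from fun h => hjk h.symm)]]
        rw [hruns j hj]
        split_ifs <;> first | rfl | omega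

-- A equals the pvG fold over range n
theorem A_eq_fold (dna STR : String) :
    str_repeats dna STR
      = (List.range dna.toList.length).foldl (pvG dna.toList STR.toList) 0 := by
  simp only [str_repeats]
  refine PySem.List.foldl_congr_mem _ _ _ _ ?_
  intro c i _
  simp only [slice_eq_cond dna.toList STR.toList i]
  have hcur : (if pvCond dna.toList STR.toList i = true
        then pvWhileA dna.toList STR.toList i (dna.toList.length + 1) 0 0 else 0)
      = pvRep dna.toList STR.toList (dna.toList.length + 1) i := by
    rcases hc : pvCond dna.toList STR.toList i with _ | _
    · rw [if_neg (by simp), pvRep_of_not_cond dna.toList STR.toList _ _ hc]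
    · rw [if_pos rfl, pvWhileA_eq dna.toList STR.toList i (dna.toList.length + 1) 0 0]
      simp
  rw [hcur]
  rfl

-- ===== VERDICT (by name: the statement is the Claim_ definition above) =====
theorem str_repeats_spec : Claim_equal_str_repeats := by
  intro dna STR _ hpre
  unfold Spec_str_repeats
  rcases Nat.eq_zero_or_pos STR.toList.length with hm0 | hm
  · -- STR = "" : Pre_ forces dna = "", everything is the empty fold
    have hSTR : STR = "" :=
      String.toList_eq_nil_iff.mp (List.eq_nil_of_length_eq_zero hm0)
    rcases hpre with h | h
    · exact absurd hSTR h
    · subst h; rfl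
  · -- main case: STR nonempty
    have hinit : ∀ j, j ≤ dna.toList.length →
        (List.replicate (dna.toList.length + 1) (0:Int)).getD j 0
          = if dna.toList.length ≤ j then pvRep dna.toList STR.toList (dna.toList.length + 1) j else 0 := by
      intro j hj
      have hz : (List.replicate (dna.toList.length + 1) (0:Int)).getD j 0 = 0 := by
        simp [List.getD, List.getElem?_replicate]
        split <;> rfl
      rw [hz]
      rcases Nat.lt_or_ge j dna.toList.length with h2 | h2
      · rw [if_neg (by omega)]
      · have hjn : j = dna.toList.length := by omega
        have hcF : pvCond dna.toList STR.toList dna.toList.length = false := by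
          rcases h : pvCond dna.toList STR.toList dna.toList.length with _ | _
          · rfl
          · have := pvCond_le dna.toList STR.toList dna.toList.length hm h; omega
        rw [hjn, if_pos (le_refl _), pvRep_of_not_cond dna.toList STR.toList _ _ hcF]
    have hperm : (List.range dna.toList.length).Perm ((List.range dna.toList.length).reverse) :=
      (List.reverse_perm _).symm
    rw [A_eq_fold dna STR,
      List.Perm.foldl_eq' hperm
        (fun x _ y _ z => pvG_comm dna.toList STR.toList z x y) 0]
    simp only [str_repeats_alt]
    rw [loopB dna.toList STR.toList hm dna.toList.length (le_refl _)
      (List.replicate (dna.toList.length + 1) 0) 0 (by simp) (le_refl 0) hinit]
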